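-- pv_equiv track=rewrite | github.com/HicrestLaboratory/HICREST-Benchmark-Collection | DLNetBench/plot_slowdown.py | _placement_groups
-- ===== SOURCE A (Python) =====
-- def _placement_groups(categories):
--     """
--     Identify contiguous runs of bars that share the same placement.
--
--     Since categories are sorted placement-first by _sort_key, consecutive
--     entries with the same placement naturally form a group.
--
--     Parameters
--     ----------
--     categories : list of (strategy, nodes, placement, model_name)
--         Sorted category keys.
--
--     Returns
--     -------
--     list of (placement_name, start_idx, end_idx)
--         One entry per contiguous group.
--     """
--     if not categories:
--         return []
--     groups = []
--     current = categories[0][2]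
--     start = 0
--     for i, cat in enumerate(categories):
--         if cat[2] != current:
--             groups.append((current, start, i - 1))
--             current = cat[2]
--             start = i
--     groups.append((current, start, len(categories) - 1))
--     return groups
-- ===== SOURCE B (Python) =====
-- def _placement_groups(categories):
--     # Recursive run-splitting: peel off each maximal leading run of equal
--     # placements and recurse on the remainder (no mutable current/start state).
--     def go(i):
--         if i >= len(categories):
--             return []
--         key = categories[i][2]
--         j = i
--         while j + 1 < len(categories) and categories[j + 1][2] == key:
--             j += 1
--         return [(key, i, j)] + go(j + 1)
--     return go(0)
-- ===== Notes on version B (the rewrite author's own statement) =====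
-- stated objective: alternative
-- what changed: Replaced A's single fold with mutable current/start state and change-detection by a recursive run-splitting decomposition: peel off each maximal leading run with an inner scan, emit its boundaries, and recurse on the remainder.
import Mathlib
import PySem

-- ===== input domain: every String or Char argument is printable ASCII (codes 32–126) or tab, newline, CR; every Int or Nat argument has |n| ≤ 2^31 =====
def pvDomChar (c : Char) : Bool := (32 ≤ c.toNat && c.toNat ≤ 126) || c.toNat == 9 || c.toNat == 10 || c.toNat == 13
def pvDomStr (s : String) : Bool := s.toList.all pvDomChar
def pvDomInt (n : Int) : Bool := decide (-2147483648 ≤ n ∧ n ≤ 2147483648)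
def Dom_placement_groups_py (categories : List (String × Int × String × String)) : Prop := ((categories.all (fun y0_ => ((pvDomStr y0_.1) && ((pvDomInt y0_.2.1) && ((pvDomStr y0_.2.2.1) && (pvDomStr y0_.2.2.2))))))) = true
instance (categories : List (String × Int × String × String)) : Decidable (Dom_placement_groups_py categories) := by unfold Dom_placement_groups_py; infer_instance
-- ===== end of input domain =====

-- B replaces A's single fold with mutable current/start state by a recursive
-- run-splitting decomposition (alternative, same O(n) cost).

-- ===== PORT A =====
def placement_groups_py (categories : List (String × Int × String × String)) : List (String × Int × Int) :=
  match categories with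
  | [] => []
  | c0 :: _ =>
    -- state = (groups, current, start), folded over enumerate(categories)
    let st := (PySem.List.enumerate categories).foldl
      (fun (st : List (String × Int × Int) × String × Int) ic =>
        if ic.2.2.2.1 ≠ st.2.1 then
          (st.1 ++ [(st.2.1, st.2.2, ic.1 - 1)], ic.2.2.2.1, ic.1)
        else st)
      (([] : List (String × Int × Int)), c0.2.2.1, (0 : Int))
    st.1 ++ [(st.2.1, st.2.2, (categories.length : Int) - 1)]

-- ===== PORT B =====
-- inner while loop of Source B: advance j over the rest of the list while the
-- placement still equals key; returns (last index of the run, remainder)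
def pvRun (key : String) (j : Int) :
    List (String × Int × String × String) → Int × List (String × Int × String × String)
  | [] => (j, [])
  | c :: rest => if c.2.2.1 = key then pvRun key (j + 1) rest else (j, c :: rest)

theorem pvRun_len (key : String) (j : Int) (l : List (String × Int × String × String)) :
    (pvRun key j l).2.length ≤ l.length := by
  induction l generalizing j with
  | nil => simp [pvRun]
  | cons c rest ih =>
    simp only [pvRun]
    split
    · exact le_trans (ih _) (Nat.le_succ _)
    · simp

-- recursive go(i) of Source B (the not-yet-processed suffix carried explicitly)
def pvAltGo (i : Int) : List (String × Int × String × String) → List (String × Int × Int)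
  | [] => []
  | c :: rest =>
    let p := pvRun c.2.2.1 i rest
    (c.2.2.1, i, p.1) :: pvAltGo (p.1 + 1) p.2
termination_by l => l.length
decreasing_by
  exact Nat.lt_succ_of_le (pvRun_len _ _ _)

def placement_groups_py_alt (categories : List (String × Int × String × String)) : List (String × Int × Int) :=
  pvAltGo 0 categories

-- ===== PRECONDITION & SPEC =====
def Spec_placement_groups_py (categories : List (String × Int × String × String)) (out : List (String × Int × Int)) : Prop := out = placement_groups_py_alt categories
instance (categories : List (String × Int × String × String)) (out : List (String × Int × Int)) : Decidable (Spec_placement_groups_py categories out) := by unfold Spec_placement_groups_py; infer_instance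

-- ===== CLAIM (what is proved, stated in full; the proofs are below) =====
def Claim_equal_placement_groups_py : Prop := ∀ (categories : List (String × Int × String × String)), Dom_placement_groups_py categories → Spec_placement_groups_py categories (placement_groups_py categories)

-- ===== LEMMAS AND PROOFS =====

-- "currently inside a run of `current` that began at `start`; remaining
-- elements l start at index i": the common intermediate description
def pvCont (current : String) (start i : Int) :
    List (String × Int × String × String) → List (String × Int × Int)
  | [] => [(current, start, i - 1)]
  | c :: rest =>
    if c.2.2.1 = current then pvCont current start (i + 1) rest
    else (current, start, i - 1) :: pvCont c.2.2.1 i (i + 1) rest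

abbrev pvStep : (List (String × Int × Int) × String × Int) → (Int × (String × Int × String × String)) → (List (String × Int × Int) × String × Int) :=
  fun st ic =>
    if ic.2.2.2.1 ≠ st.2.1 then
      (st.1 ++ [(st.2.1, st.2.2, ic.1 - 1)], ic.2.2.2.1, ic.1)
    else st

theorem pvA_loop (l : List (String × Int × String × String)) :
    ∀ (groups : List (String × Int × Int)) (current : String) (start i : Int),
    (let st := (PySem.List.enumerate l i).foldl pvStep (groups, current, start)
     st.1 ++ [(st.2.1, st.2.2, i + (l.length : Int) - 1)])
    = groups ++ pvCont current start i l := by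
  induction l with
  | nil => intro groups current start i; simp [PySem.List.enumerate_nil, pvCont]
  | cons c rest ih =>
    intro groups current start i
    simp only [PySem.List.enumerate_cons, List.foldl_cons, pvCont]
    by_cases h : c.2.2.1 = current
    · rw [if_pos h]
      have hstep : pvStep (groups, current, start) (i, c) = (groups, current, start) := by
        simp [pvStep, h]
      rw [hstep]
      have := ih groups current start (i + 1)
      simp only [List.length_cons]
      push_cast
      rw [show i + ((rest.length : Int) + 1) - 1 = i + 1 + (rest.length : Int) - 1 by ring]
      exact this
    · rw [if_neg h]
      have hstep : pvStep (groups, current, start) (i, c)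
          = (groups ++ [(current, start, i - 1)], c.2.2.1, i) := by
        simp [pvStep, h]
      rw [hstep]
      have := ih (groups ++ [(current, start, i - 1)]) c.2.2.1 i (i + 1)
      simp only [List.length_cons]
      push_cast
      rw [show i + ((rest.length : Int) + 1) - 1 = i + 1 + (rest.length : Int) - 1 by ring]
      rw [this]
      simp

theorem pvB_cont (l : List (String × Int × String × String)) :
    ∀ (key : String) (start i : Int),
    pvCont key start i l
    = (key, start, (pvRun key (i - 1) l).1) :: pvAltGo ((pvRun key (i - 1) l).1 + 1) (pvRun key (i - 1) l).2 := by
  induction l with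
  | nil => intro key start i; simp [pvCont, pvRun, pvAltGo]
  | cons c rest ih =>
    intro key start i
    simp only [pvCont, pvRun]
    by_cases h : c.2.2.1 = key
    · simp only [h, if_true]
      have := ih key start (i + 1)
      rw [show i + 1 - 1 = (i - 1) + 1 by ring] at this
      exact this
    · simp only [h, if_false]
      rw [pvAltGo]
      have := ih c.2.2.1 i (i + 1)
      rw [show i + 1 - 1 = i by ring] at this
      simp [this]

-- ===== VERDICT (by name: the statement is the Claim_ definition above) =====
theorem placement_groups_py_spec : Claim_equal_placement_groups_py := by
  intro categories _
  unfold Spec_placement_groups_py placement_groups_py_alt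
  cases categories with
  | nil => simp [placement_groups_py, pvAltGo]
  | cons c rest =>
    have hA := pvA_loop (c :: rest) [] c.2.2.1 0 0
    simp only [List.nil_append, zero_add] at hA
    show (List.foldl pvStep ([], c.2.2.1, 0) (PySem.List.enumerate (c :: rest) 0)).1 ++
        [((List.foldl pvStep ([], c.2.2.1, 0) (PySem.List.enumerate (c :: rest) 0)).2.1,
          (List.foldl pvStep ([], c.2.2.1, 0) (PySem.List.enumerate (c :: rest) 0)).2.2,
          (((c :: rest).length : Int)) - 1)] = pvAltGo 0 (c :: rest)
    rw [hA]
    have h1 : pvCont c.2.2.1 0 0 (c :: rest) = pvCont c.2.2.1 0 1 rest := by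
      simp [pvCont]
    have hB := pvB_cont rest c.2.2.1 0 1
    norm_num at hB
    rw [h1, hB, pvAltGo]
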